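-- pv_equiv track=rewrite | github.com/petersbingham/latutil | tutil/__init__.py | transpose_table
-- ===== SOURCE A (Python) =====
-- def transpose_table(header, body, number_label_columns):
--   num_rows = len(body[0]) - number_label_columns
--   num_cols = len(body)
--   mod = 0
--   if header is not None:
--     mod = 1
--     num_cols += 1
--
--   new_body = [[0 for i in range(num_cols)] for j in range(num_rows)]
--   for i in range(num_rows):
--     for j in range(num_cols):
--       if j==0 and header is not None:
--         new_body[i][0] = header[number_label_columns + i]
--       else:
--         new_body[i][j] = body[j - mod][i + number_label_columns]
--
--   new_header = amalgamate_column_labels(body, number_label_columns)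
--   if header is not None and new_header is not None:
--     new_header = [''] + new_header
--
--   return new_header, new_body
--
-- def amalgamate_column_labels(body, number_label_columns):
--   amal_lbls = None
--   if number_label_columns > 0:
--     amal_lbls = []
--     lbls = ['' for _ in range(number_label_columns)]
--     for row in body:
--       for i in range(number_label_columns):
--         if row[i] != '':
--           lbls[i] = row[i]
--       amal_lbls.append(' '.join(lbls))
--   return amal_lbls
-- ===== SOURCE B (Python) =====
-- def transpose_table(header, body, number_label_columns):
--   k = number_label_columns
--   num_rows = len(body[0]) - k
--   new_body = [[body[j][k + i] for j in range(len(body))] for i in range(num_rows)]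
--   if header is not None:
--     for i, row in enumerate(new_body):
--       row.insert(0, header[k + i])
--   new_header = amalgamate_column_labels(body, k)
--   if header is not None and new_header is not None:
--     new_header = [''] + new_header
--   return new_header, new_body
--
-- def _amalgamated_label(body, r, i):
--   return next((body[s][i] for s in range(r, -1, -1) if body[s][i] != ''), '')
--
-- def amalgamate_column_labels(body, number_label_columns):
--   k = number_label_columns
--   if k <= 0:
--     return None
--   return [' '.join(_amalgamated_label(body, r, i) for i in range(k))
--           for r in range(len(body))]
-- ===== Notes on version B (the rewrite author's own statement) =====
-- stated objective: alternative
-- what changed: A's single zero-matrix fill loop with a mod offset and an in-branch header case is replaced by a direct index transpose plus a separate header-prepend pass, and the label amalgamation's mutable running-labels fold is replaced by a per-cell backward first-non-empty search.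
import Mathlib
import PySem

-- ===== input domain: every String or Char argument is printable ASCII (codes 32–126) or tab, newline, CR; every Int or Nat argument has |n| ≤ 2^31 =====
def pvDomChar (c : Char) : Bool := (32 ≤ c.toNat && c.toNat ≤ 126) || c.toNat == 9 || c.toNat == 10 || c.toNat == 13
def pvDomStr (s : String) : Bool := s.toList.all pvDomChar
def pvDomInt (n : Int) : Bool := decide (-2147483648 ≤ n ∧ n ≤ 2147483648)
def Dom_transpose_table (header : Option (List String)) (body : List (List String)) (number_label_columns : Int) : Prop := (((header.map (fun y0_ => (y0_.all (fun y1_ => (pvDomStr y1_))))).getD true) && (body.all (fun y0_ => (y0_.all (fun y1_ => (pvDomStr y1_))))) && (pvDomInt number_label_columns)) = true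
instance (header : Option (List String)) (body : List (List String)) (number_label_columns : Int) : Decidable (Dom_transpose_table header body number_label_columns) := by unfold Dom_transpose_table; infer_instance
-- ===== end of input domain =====

-- B replaces A's mod-offset fill loop by a direct transpose plus a header-prepend pass, and the
-- running-labels amalgamation by a backward first-non-empty search (alternative decomposition, same result).

-- ===== PORT A =====
-- amalgamate_column_labels: running lbls list mutated in place, one joined snapshot appended per row
def pv_amal (body : List (List String)) (n : Int) : Option (List String) :=
  if 0 < n then
    some ((body.foldl (fun (st : List String × List String) row =>
      let lbls := (PySem.List.pyRange 0 n 1).foldl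
        (fun ls i => if PySem.List.pyGetD row i "" ≠ "" then PySem.List.pySetD ls i (PySem.List.pyGetD row i "") else ls) st.1
      (lbls, st.2 ++ [PySem.Str.join " " lbls]))
      ((PySem.List.pyRange 0 n 1).map (fun _ => ""), [])).2)
  else none

-- the zero-initialised new_body is fully overwritten cell by cell; the fill loop is transcribed as
-- the map computing each cell new_body[i][j] (same branch, same indices, mod offset kept)
def transpose_table (header : Option (List String)) (body : List (List String)) (number_label_columns : Int) : Option (List String) × List (List String) :=
  let num_rows : Int := ((PySem.List.pyGetD body 0 []).length : Int) - number_label_columns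
  let md : Int := if header.isSome then 1 else 0
  let num_cols : Int := (body.length : Int) + md
  let new_body := (PySem.List.pyRange 0 num_rows 1).map (fun i =>
    (PySem.List.pyRange 0 num_cols 1).map (fun j =>
      if j = 0 ∧ header.isSome then
        PySem.List.pyGetD (header.getD []) (number_label_columns + i) ""
      else
        PySem.List.pyGetD (PySem.List.pyGetD body (j - md) []) (i + number_label_columns) ""))
  let nh := pv_amal body number_label_columns
  let nh' := if header.isSome ∧ nh.isSome then some ("" :: nh.getD []) else nh
  (nh', new_body)

-- ===== PORT B =====
def pv_label (body : List (List String)) (r i : Int) : String :=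
  (((PySem.List.pyRange r (-1) (-1)).map (fun s => PySem.List.pyGetD (PySem.List.pyGetD body s []) i "")).find? (fun v => v ≠ "")).getD ""

def pv_amal_alt (body : List (List String)) (n : Int) : Option (List String) :=
  if n ≤ 0 then none
  else
    some ((PySem.List.pyRange 0 (body.length : Int) 1).map (fun r =>
      PySem.Str.join " " ((PySem.List.pyRange 0 n 1).map (fun i => pv_label body r i))))

def transpose_table_alt (header : Option (List String)) (body : List (List String)) (number_label_columns : Int) : Option (List String) × List (List String) :=
  let num_rows : Int := ((PySem.List.pyGetD body 0 []).length : Int) - number_label_columns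
  let nb := (PySem.List.pyRange 0 num_rows 1).map (fun i =>
    (PySem.List.pyRange 0 (body.length : Int) 1).map (fun j =>
      PySem.List.pyGetD (PySem.List.pyGetD body j []) (number_label_columns + i) ""))
  let nb' := match header with
    | none => nb
    | some h => (PySem.List.enumerate nb 0).map (fun p => PySem.List.insert p.2 0 (PySem.List.pyGetD h (number_label_columns + p.1) ""))
  let nh := pv_amal_alt body number_label_columns
  let nh' := if header.isSome ∧ nh.isSome then some ("" :: nh.getD []) else nh
  (nh', nb')

-- ===== PRECONDITION & SPEC =====
-- Pre_ is exactly the set of inputs on which the Python A returns (no IndexError): body non-empty,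
-- every label/transpose/header index access in (possibly negative-wraparound) range.
def Pre_transpose_table (header : Option (List String)) (body : List (List String)) (number_label_columns : Int) : Prop :=
  body ≠ [] ∧
  (0 < number_label_columns → ∀ row ∈ body, number_label_columns ≤ (row.length : Int)) ∧
  (number_label_columns < ((body.headD []).length : Int) →
    (∀ row ∈ body, -(row.length : Int) ≤ number_label_columns ∧ ((body.headD []).length : Int) ≤ (row.length : Int)) ∧
    (∀ h ∈ header, -(h.length : Int) ≤ number_label_columns ∧ ((body.headD []).length : Int) ≤ (h.length : Int)))
instance (header : Option (List String)) (body : List (List String)) (number_label_columns : Int) : Decidable (Pre_transpose_table header body number_label_columns) := by unfold Pre_transpose_table; infer_instance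

def pvWitness_transpose_table : Option (List String) × List (List String) × Int := (some ["h", "x"], [["l", "a"], ["m", "b"]], 1)

def Spec_transpose_table (header : Option (List String)) (body : List (List String)) (number_label_columns : Int) (out : Option (List String) × List (List String)) : Prop := out = transpose_table_alt header body number_label_columns
instance (header : Option (List String)) (body : List (List String)) (number_label_columns : Int) (out : Option (List String) × List (List String)) : Decidable (Spec_transpose_table header body number_label_columns out) := by unfold Spec_transpose_table; infer_instance

-- ===== CLAIM (what is proved, stated in full; the proofs are below) =====
def Claim_equal_transpose_table : Prop := ∀ (header : Option (List String)) (body : List (List String)) (number_label_columns : Int), Dom_transpose_table header body number_label_columns → Pre_transpose_table header body number_label_columns → Spec_transpose_table header body number_label_columns (transpose_table header body number_label_columns)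

-- ===== LEMMAS AND PROOFS =====

-- proof-only helpers: the common functional description of the amalgamated labels
def pvProj (i : Nat) (row : List String) : String := row.getD i ""
def pvLastFrom (d : String) (col : List String) : String := col.foldl (fun cur v => if v ≠ "" then v else cur) d
def pvCommon (body : List (List String)) (k : Nat) : List String :=
  (List.range body.length).map (fun r => PySem.Str.join " " ((List.range k).map (fun i => pvLastFrom "" ((body.take (r+1)).map (pvProj i)))))

theorem pv_set_map_range {α : Type} (m q : Nat) (v : α) (F : Nat → α) (hq : q < m) :
    ((List.range m).map F).set q v = (List.range m).map (fun i => if i = q then v else F i) := by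
  apply List.ext_getElem
  · simp
  · intro p h1 h2
    simp only [List.getElem_set, List.getElem_map, List.getElem_range]
    by_cases h : p = q
    · subst h; simp
    · rw [if_neg (fun e => h e.symm), if_neg h]

theorem pv_inner_fold (row : List String) (k m : Nat) (F : Nat → String) (hkm : k ≤ m) :
    (List.range k).foldl (fun ls i => if row.getD i "" ≠ "" then ls.set i (row.getD i "") else ls) ((List.range m).map F)
      = (List.range m).map (fun i => if i < k ∧ row.getD i "" ≠ "" then row.getD i "" else F i) := by
  induction k with
  | zero => simp
  | succ t ih =>
    rw [List.range_succ, List.foldl_append, ih (by omega)]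
    simp only [List.foldl_cons, List.foldl_nil]
    by_cases hne : row.getD t "" ≠ ""
    · rw [if_pos hne, pv_set_map_range m t _ _ (by omega)]
      apply List.map_congr_left
      intro i _
      by_cases het : i = t
      · subst het
        rw [if_pos rfl, if_pos ⟨Nat.lt_succ_self _, hne⟩]
      · rw [if_neg het]
        have h : (i < t ∧ row.getD i "" ≠ "") ↔ (i < t + 1 ∧ row.getD i "" ≠ "") := by
          constructor
          · rintro ⟨a, b⟩; exact ⟨Nat.lt_succ_of_lt a, b⟩
          · rintro ⟨a, b⟩; exact ⟨by omega, b⟩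
        rw [if_congr h rfl rfl]
    · rw [if_neg hne]
      apply List.map_congr_left
      intro i _
      have h : (i < t ∧ row.getD i "" ≠ "") ↔ (i < t + 1 ∧ row.getD i "" ≠ "") := by
        constructor
        · rintro ⟨a, b⟩; exact ⟨Nat.lt_succ_of_lt a, b⟩
        · rintro ⟨a, b⟩
          by_cases het : i = t
          · exact absurd b (het ▸ hne)
          · exact ⟨by omega, b⟩
      rw [if_congr h rfl rfl]

theorem pv_inner_bridge (row : List String) (n : Int) (ls0 : List String) :
    (PySem.List.pyRange 0 n 1).foldl
        (fun ls i => if PySem.List.pyGetD row i "" ≠ "" then PySem.List.pySetD ls i (PySem.List.pyGetD row i "") else ls) ls0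
      = (List.range n.toNat).foldl (fun ls i => if row.getD i "" ≠ "" then ls.set i (row.getD i "") else ls) ls0 := by
  rw [PySem.List.pyRange_one, List.foldl_map]
  simp only [Int.sub_zero, Int.zero_add, PySem.List.pyGetD_natCast, PySem.List.pySetD_natCast]

theorem pv_outer_fold (p : List (List String)) (k : Nat) (g : Nat → String) (out0 : List String) :
    p.foldl (fun (st : List String × List String) row =>
        let l' := (List.range k).foldl (fun ls i => if row.getD i "" ≠ "" then ls.set i (row.getD i "") else ls) st.1
        (l', st.2 ++ [PySem.Str.join " " l'])) ((List.range k).map g, out0)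
      = ((List.range k).map (fun i => pvLastFrom (g i) (p.map (pvProj i))),
         out0 ++ (List.range p.length).map (fun r =>
            PySem.Str.join " " ((List.range k).map (fun i => pvLastFrom (g i) ((p.take (r+1)).map (pvProj i)))))) := by
  induction p using List.reverseRecOn with
  | nil => simp [pvLastFrom]
  | append_singleton p row ih =>
    rw [List.foldl_append, ih]
    simp only [List.foldl_cons, List.foldl_nil]
    have hl : (List.range k).foldl (fun ls i => if row.getD i "" ≠ "" then ls.set i (row.getD i "") else ls)
          ((List.range k).map fun i => pvLastFrom (g i) (p.map (pvProj i)))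
        = (List.range k).map fun i => pvLastFrom (g i) ((p ++ [row]).map (pvProj i)) := by
      rw [pv_inner_fold row k k _ le_rfl]
      apply List.map_congr_left
      intro i hi
      simp only [List.mem_range] at hi
      simp only [List.map_append, pvLastFrom, List.foldl_append, List.map_cons, List.map_nil,
        List.foldl_cons, List.foldl_nil, pvProj, hi, true_and]
    rw [hl]
    refine Prod.ext rfl ?_
    simp only [List.length_append, List.length_cons, List.length_nil]
    rw [List.range_succ, List.map_append, ← List.append_assoc]
    congr 1
    · congr 1
      apply List.map_congr_left
      intro r hr
      simp only [List.mem_range] at hr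
      rw [List.take_append_of_le_length (by omega)]
    · simp only [List.map_cons, List.map_nil]
      congr 2
      apply List.map_congr_left
      intro i hi
      rw [List.take_of_length_le (by simp)]

theorem pv_amal_char (body : List (List String)) (n : Int) (hn : 0 < n) :
    pv_amal body n = some (pvCommon body n.toNat) := by
  unfold pv_amal
  rw [if_pos hn]
  have hstep : (fun (st : List String × List String) (row : List String) =>
      let lbls := (PySem.List.pyRange 0 n 1).foldl
        (fun ls i => if PySem.List.pyGetD row i "" ≠ "" then PySem.List.pySetD ls i (PySem.List.pyGetD row i "") else ls) st.1
      (lbls, st.2 ++ [PySem.Str.join " " lbls]))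
      = (fun (st : List String × List String) (row : List String) =>
      let l' := (List.range n.toNat).foldl (fun ls i => if row.getD i "" ≠ "" then ls.set i (row.getD i "") else ls) st.1
      (l', st.2 ++ [PySem.Str.join " " l'])) := by
    funext st row
    simp only [pv_inner_bridge]
  have hinit : (PySem.List.pyRange 0 n 1).map (fun _ => "") = (List.range n.toNat).map (fun _ : Nat => "") := by
    rw [PySem.List.pyRange_one, List.map_map]
    simp [Function.comp_def]
  rw [hstep, hinit, pv_outer_fold]
  simp [pvCommon]

theorem pv_find_rev (col : List String) (d : String) :
    ((col.reverse.find? (fun v => v ≠ "")).getD d) = pvLastFrom d col := by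
  induction col using List.reverseRecOn with
  | nil => simp [pvLastFrom]
  | append_singleton col v ih =>
    have hrev : (col ++ [v]).reverse = v :: col.reverse := by simp
    rw [hrev]
    by_cases hv : v = ""
    · rw [List.find?_cons_of_neg (by simp [hv])]
      have h2 : pvLastFrom d (col ++ [v]) = pvLastFrom d col := by
        simp [pvLastFrom, List.foldl_append, hv]
      rw [h2]
      exact ih
    · rw [List.find?_cons_of_pos (by simpa using hv)]
      simp [pvLastFrom, List.foldl_append, hv]

theorem pv_label_char (body : List (List String)) (r i : Nat) (hr : r < body.length) :
    pv_label body (r : Int) (i : Int) = pvLastFrom "" ((body.take (r+1)).map (pvProj i)) := by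
  unfold pv_label
  have hM : (PySem.List.pyRange (r : Int) (-1) (-1)).map
        (fun s => PySem.List.pyGetD (PySem.List.pyGetD body s []) (i : Int) "")
      = ((body.take (r+1)).map (pvProj i)).reverse := by
    rw [PySem.List.pyRange_neg_one]
    apply List.ext_getElem
    · simp; omega
    · intro q h1 h2
      simp only [List.getElem_map, List.getElem_range, List.getElem_reverse]
      have hq : q < r + 1 := by simpa using h1
      have h3 : (r : Int) - (q : Int) = ((r - q : Nat) : Int) := by omega
      rw [h3]
      simp only [PySem.List.pyGetD_natCast]
      have hlt : r - q < body.length := by omega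
      rw [List.getD_eq_getElem body [] hlt]
      simp only [List.getElem_take, List.length_map, List.length_take]
      have hidx : min (r + 1) body.length - 1 - q = r - q := by omega
      simp only [hidx]
      rfl
  rw [hM, pv_find_rev]

theorem pv_amal_alt_char (body : List (List String)) (n : Int) (hn : 0 < n) :
    pv_amal_alt body n = some (pvCommon body n.toNat) := by
  unfold pv_amal_alt
  rw [if_neg (by omega)]
  congr 1
  unfold pvCommon
  rw [show (PySem.List.pyRange 0 ((body.length : Int)) 1) = (List.range body.length).map (fun r : Nat => (r : Int)) from by
    rw [PySem.List.pyRange_one]; simp]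
  rw [List.map_map]
  apply List.map_congr_left
  intro r hr
  simp only [List.mem_range] at hr
  simp only [Function.comp_apply]
  congr 1
  rw [show (PySem.List.pyRange 0 n 1) = (List.range n.toNat).map (fun i : Nat => (i : Int)) from by
    rw [PySem.List.pyRange_one]; simp]
  rw [List.map_map]
  apply List.map_congr_left
  intro i _
  simp only [Function.comp_apply]
  exact pv_label_char body r i hr

theorem pv_amal_eq (body : List (List String)) (n : Int) :
    pv_amal body n = pv_amal_alt body n := by
  rcases Int.lt_or_le 0 n with h | h
  · rw [pv_amal_char body n h, pv_amal_alt_char body n h]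
  · unfold pv_amal pv_amal_alt
    rw [if_neg (by omega), if_pos (by omega)]

theorem pv_enum_pyRange (a b : Int) :
    PySem.List.enumerate (PySem.List.pyRange a b 1) a = (PySem.List.pyRange a b 1).map (fun i => (i, i)) := by
  by_cases hab : b ≤ a
  · rw [PySem.List.pyRange_one_eq_nil hab]; rfl
  · have h : (b - a).toNat ≠ 0 := by omega
    obtain ⟨t, ht⟩ := Nat.exists_eq_succ_of_ne_zero h
    clear h hab
    induction t generalizing a with
    | zero =>
      have hlt : a < b := by omega
      have hb : b ≤ a + 1 := by omega
      rw [PySem.List.pyRange_one_cons hlt, PySem.List.pyRange_one_eq_nil hb]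
      rfl
    | succ t ih =>
      have hlt : a < b := by omega
      rw [PySem.List.pyRange_one_cons hlt, PySem.List.enumerate_cons, List.map_cons,
        ih (a + 1) (by omega)]

theorem pv_enum_map {α : Type} (xs : List α) (f : α → List String) (s : Int) :
    PySem.List.enumerate (xs.map f) s = (PySem.List.enumerate xs s).map (fun p => (p.1, f p.2)) := by
  induction xs generalizing s with
  | nil => rfl
  | cons x xs ih => simp [PySem.List.enumerate_cons, ih]

theorem pv_body_eq (header : Option (List String)) (body : List (List String)) (n : Int) :
    (transpose_table header body n).2 = (transpose_table_alt header body n).2 := by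
  cases header with
  | none =>
    simp only [transpose_table, transpose_table_alt, Option.isSome_none]
    apply List.map_congr_left
    intro i _
    apply List.map_congr_left
    intro j _
    simp [Int.add_comm]
  | some h =>
    simp only [transpose_table, transpose_table_alt, Option.isSome_some, Option.getD_some]
    rw [pv_enum_map, pv_enum_pyRange, List.map_map, List.map_map]
    apply List.map_congr_left
    intro i _
    simp only [Function.comp_apply, PySem.List.insert_zero]
    rw [PySem.List.pyRange_one_cons (by simp)]
    simp only [List.map_cons]
    congr 1
    rw [PySem.List.pyRange_one, PySem.List.pyRange_one]
    simp only [List.map_map, Int.sub_zero, if_true, and_true, zero_add, Int.add_sub_cancel]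
    apply List.map_congr_left
    intro q _
    simp only [Function.comp_apply]
    rw [if_neg (by omega : ¬ ((1 : Int) + (q : Int) = 0))]
    rw [show (1 : Int) + (q : Int) - 1 = (q : Int) from by omega]
    rw [Int.add_comm i n]

theorem transpose_table_total_eq (header : Option (List String)) (body : List (List String)) (n : Int) :
    transpose_table header body n = transpose_table_alt header body n := by
  refine Prod.ext ?_ (pv_body_eq header body n)
  simp only [transpose_table, transpose_table_alt, pv_amal_eq]

-- ===== VERDICT (by name: the statement is the Claim_ definition above) =====
theorem transpose_table_spec : Claim_equal_transpose_table := by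
  intro header body n _ _
  unfold Spec_transpose_table
  exact transpose_table_total_eq header body n
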